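-- pv_equiv track=rewrite | github.com/YangInWinter/SelfDictation | main.py | parse
-- ===== SOURCE A (Python) =====
-- def parse(cmd):
--     """
--     解析命令，以字典的形式返回结果。\n
--     解码后字典的结构：\n
--     {"cmd":"命令", "-a":"参数a的输入（如果没有则为空）", "-b":"同理为参数b的输入"}
--     """
--     res = {} # 初始化返回列表
--     parse_list = cmd.split() # 将输入以空格分割到列表
--     # 遍历列表进行解析
--     # 第一个单词为命令名称
--     if not not parse_list:
--         res["cmd"] = parse_list[0]
--     option_name = "-param" # 默认将选项名称设为“-param”
--     for content in parse_list[1:]: # 忽视已设为命令名称的第一项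
--         if content[0] == '-': # 参数以“-”开头
--             option_name = content
--         else:
--             if not(option_name in res): # 判断是否存在该项
--                 res[option_name] = str(content)
--             else:
--                 res[option_name] += ' ' + str(content)
--     return res
-- ===== SOURCE B (Python) =====
-- def parse(cmd):
--     tokens = cmd.split()
--     res = {}
--     if tokens:
--         res["cmd"] = tokens[0]
--     groups = {}
--     key = "-param"
--     for tok in tokens[1:]:
--         if tok.startswith('-'):
--             key = tok
--         else:
--             groups.setdefault(key, []).append(tok)
--     for k, vs in groups.items():
--         res[k] = ' '.join(vs)
--     return res
-- ===== Notes on version B (the rewrite author's own statement) =====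
-- stated objective: simpler
-- what changed: B replaces A's single loop that grows a concatenated string per option inside the result dict (with a membership-test branch) by a two-pass decomposition: one pass groups value tokens into per-option lists via setdefault/append, a second pass joins each list once with a space separator; the command-name entry is set up front.
import Mathlib
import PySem

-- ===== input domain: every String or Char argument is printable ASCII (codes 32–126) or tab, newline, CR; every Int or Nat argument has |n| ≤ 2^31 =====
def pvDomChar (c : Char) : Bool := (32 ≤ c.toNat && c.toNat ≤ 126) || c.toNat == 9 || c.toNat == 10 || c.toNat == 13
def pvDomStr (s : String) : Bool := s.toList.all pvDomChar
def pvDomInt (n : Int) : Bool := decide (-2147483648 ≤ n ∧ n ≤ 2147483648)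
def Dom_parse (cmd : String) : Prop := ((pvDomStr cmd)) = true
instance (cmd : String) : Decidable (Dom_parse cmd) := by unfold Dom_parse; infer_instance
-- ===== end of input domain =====

-- B replaces A's grow-a-concatenated-string dict with a two-pass decomposition
-- (group values into per-option lists, then join each list once); objective: simpler/idiomatic, same cost.

-- ===== PORT A =====
-- loop body of A's for-loop, extracted as a helper (state = (res, option_name))
def parseStepA (st : PySem.Dict String String × String) (content : String) :
    PySem.Dict String String × String :=
  if PySem.Str.pyGet? content 0 = some '-' then
    (st.1, content)
  else if ¬ st.1.contains st.2 then
    (st.1.insert st.2 content, st.2)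
  else
    (st.1.insert st.2 (st.1.getD st.2 "" ++ " " ++ content), st.2)

def parse (cmd : String) : List (String × String) :=
  let res : PySem.Dict String String := PySem.Dict.empty
  let parse_list := PySem.Str.split₀ cmd
  let res := match parse_list with
    | [] => res
    | x :: _ => res.insert "cmd" x
  let st := (PySem.List.slice parse_list (some 1) none).foldl parseStepA (res, "-param")
  st.1.items

-- ===== PORT B =====
-- loop body of B's grouping loop (state = (groups, key))
def parseStepB (st : PySem.Dict String (List String) × String) (tok : String) :
    PySem.Dict String (List String) × String :=
  if PySem.Str.startswith tok "-" then
    (st.1, tok)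
  else
    (st.1.modify st.2 [] (fun vs => vs ++ [tok]), st.2)

def parse_alt (cmd : String) : List (String × String) :=
  let tokens := PySem.Str.split₀ cmd
  let res : PySem.Dict String String := match tokens with
    | [] => PySem.Dict.empty
    | x :: _ => PySem.Dict.empty.insert "cmd" x
  let st := (tokens.drop 1).foldl parseStepB (PySem.Dict.empty, "-param")
  (st.1.items.foldl (fun (r : PySem.Dict String String) kv =>
      r.insert kv.1 (PySem.Str.join " " kv.2)) res).items

-- ===== PRECONDITION & SPEC =====
def Spec_parse (cmd : String) (out : List (String × String)) : Prop := out = parse_alt cmd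
instance (cmd : String) (out : List (String × String)) : Decidable (Spec_parse cmd out) := by unfold Spec_parse; infer_instance

-- ===== CLAIM (what is proved, stated in full; the proofs are below) =====
def Claim_equal_parse : Prop := ∀ (cmd : String), Dom_parse cmd → Spec_parse cmd (parse cmd)

-- ===== LEMMAS AND PROOFS =====

-- value map applied to each group in B's second pass
def pvMapF (p : String × List String) : String × String := (p.1, PySem.Str.join " " p.2)

lemma pv_join_singleton (t : String) : PySem.Str.join " " [t] = t := by
  simp [PySem.Str.join]

lemma pv_chars_join_append (l : List (List Char)) (t : List Char) (h : l ≠ []) :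
    PySem.Chars.join [' '] (l ++ [t]) = PySem.Chars.join [' '] l ++ [' '] ++ t := by
  induction l with
  | nil => simp at h
  | cons v rest ih =>
    cases rest with
    | nil => simp [PySem.Chars.join_cons_cons, PySem.Chars.join_singleton]
    | cons w r =>
      simp only [List.cons_append, PySem.Chars.join_cons_cons] at *
      simp [ih, List.append_assoc]

lemma pv_join_append (vs : List String) (t : String) (h : vs ≠ []) :
    PySem.Str.join " " (vs ++ [t]) = PySem.Str.join " " vs ++ " " ++ t := by
  apply String.toList_inj.mp
  simp only [PySem.Str.toList_join, String.toList_append, List.map_append, List.map_cons,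
    List.map_nil]
  have hsp : (" " : String).toList = [' '] := rfl
  rw [hsp, pv_chars_join_append _ _ (by simpa using h)]

lemma pv_dash_iff (tok : String) :
    (PySem.Str.pyGet? tok 0 = some '-') ↔ PySem.Str.startswith tok "-" = true := by
  simp [pysem]
  cases tok.toList with
  | nil => simp
  | cons c t => simp [List.cons_prefix_cons, eq_comm]

lemma pv_ne_cmd (k : String) (hk : PySem.Str.startswith k "-" = true) : ("cmd" == k) = false := by
  simp only [beq_eq_false_iff_ne]; intro e
  rw [← e] at hk; simp [pysem] at hk

lemma pv_contains_mk (g : PySem.Dict String (List String)) (k x : String)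
    (hk : PySem.Str.startswith k "-" = true) :
    (PySem.Dict.mk (("cmd", x) :: g.items.map pvMapF)).contains k = g.contains k := by
  simp [PySem.Dict.contains, pv_ne_cmd k hk, List.any_map, Function.comp_def, pvMapF]

-- B's grouping step keeps all group keys dash-prefixed, all value lists nonempty, keys distinct
lemma pv_stepB_inv (g : PySem.Dict String (List String)) (k tok : String)
    (hg : ∀ p ∈ g.items, PySem.Str.startswith p.1 "-" = true ∧ p.2 ≠ [])
    (hnd : g.keys.Nodup)
    (hk : PySem.Str.startswith k "-" = true) :
    (∀ p ∈ (parseStepB (g, k) tok).1.items,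
        PySem.Str.startswith p.1 "-" = true ∧ p.2 ≠ []) ∧
      (parseStepB (g, k) tok).1.keys.Nodup ∧
      PySem.Str.startswith (parseStepB (g, k) tok).2 "-" = true := by
  by_cases hdash : PySem.Str.startswith tok "-" = true
  · rw [show parseStepB (g, k) tok = (g, tok) from by unfold parseStepB; rw [if_pos hdash]]
    exact ⟨hg, hnd, hdash⟩
  · rw [show parseStepB (g, k) tok = (g.modify k [] (fun vs => vs ++ [tok]), k) from by
      unfold parseStepB; rw [if_neg hdash]]
    have hmod : g.modify k [] (fun vs => vs ++ [tok]) = g.insert k (g.getD k [] ++ [tok]) := rfl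
    by_cases hc : g.contains k = true
    · refine ⟨?_, ?_, hk⟩
      · intro p hp
        rw [hmod, PySem.Dict.items_insert_of_contains _ _ hc] at hp
        obtain ⟨q, hq, hpq⟩ := List.mem_map.mp hp
        by_cases hqk : (q.1 == k) = true
        · rw [if_pos hqk] at hpq
          subst hpq
          exact ⟨hk, by simp⟩
        · rw [if_neg (by simp [hqk])] at hpq
          subst hpq; exact hg q hq
      · rw [hmod]
        have hkeys : (g.insert k (g.getD k [] ++ [tok])).keys = g.keys := by
          show (g.insert k (g.getD k [] ++ [tok])).items.map Prod.fst = g.items.map Prod.fst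
          rw [PySem.Dict.items_insert_of_contains _ _ hc, List.map_map]
          apply List.map_congr_left
          intro q _
          by_cases hqk : (q.1 == k) = true
          · simp only [Function.comp_apply, if_pos hqk]
            exact (eq_of_beq hqk).symm
          · have hne : q.1 ≠ k := fun e => hqk (by simp [e])
            simp [Function.comp_apply, hne]
        rw [hkeys]; exact hnd
    · have hcf : g.contains k = false := by simpa using hc
      have hitems : (g.modify k [] (fun vs => vs ++ [tok])).items = g.items ++ [(k, [tok])] := by
        rw [hmod, PySem.Dict.items_insert_of_not_contains _ _ hcf,
          PySem.Dict.getD_of_not_contains _ _ hcf]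
        simp
      refine ⟨?_, ?_, hk⟩
      · intro p hp
        rw [hitems] at hp
        rcases List.mem_append.mp hp with h' | h'
        · exact hg p h'
        · simp at h'; subst h'; exact ⟨hk, by simp⟩
      · show ((g.modify k [] (fun vs => vs ++ [tok])).items.map Prod.fst).Nodup
        rw [hitems, List.map_append]
        simp only [List.map_cons, List.map_nil]
        rw [List.nodup_append]
        refine ⟨hnd, List.nodup_singleton _, ?_⟩
        intro a ha b hb
        rw [List.mem_singleton] at hb
        subst hb
        intro e
        subst e
        have hnk : a ∉ g.keys := by
          intro hmemk
          rw [← PySem.Dict.contains_iff_mem_keys] at hmemk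
          rw [hcf] at hmemk
          exact Bool.false_ne_true hmemk
        exact hnk ha

-- main loop invariant: A's dict is the "cmd" entry followed by B's groups mapped through pvMapF
lemma pv_loop_eq (toks : List String) (g : PySem.Dict String (List String)) (k x : String)
    (hg : ∀ p ∈ g.items, PySem.Str.startswith p.1 "-" = true ∧ p.2 ≠ [])
    (hnd : g.keys.Nodup)
    (hk : PySem.Str.startswith k "-" = true) :
    toks.foldl parseStepA (PySem.Dict.mk (("cmd", x) :: g.items.map pvMapF), k)
      = (PySem.Dict.mk (("cmd", x) :: ((toks.foldl parseStepB (g, k)).1.items.map pvMapF)),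
         (toks.foldl parseStepB (g, k)).2) := by
  induction toks generalizing g k with
  | nil => rfl
  | cons tok rest ih =>
    simp only [List.foldl_cons]
    obtain ⟨hg', hnd', hk'⟩ := pv_stepB_inv g k tok hg hnd hk
    by_cases hdash : PySem.Str.startswith tok "-" = true
    · have hA : PySem.Str.pyGet? tok 0 = some '-' := (pv_dash_iff tok).mpr hdash
      rw [show parseStepA (PySem.Dict.mk (("cmd", x) :: g.items.map pvMapF), k) tok
            = (PySem.Dict.mk (("cmd", x) :: g.items.map pvMapF), tok) from by
          unfold parseStepA; rw [if_pos hA],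
        show parseStepB (g, k) tok = (g, tok) from by unfold parseStepB; rw [if_pos hdash]]
      exact ih g tok hg hnd hdash
    · have hdashA : ¬ (PySem.Str.pyGet? tok 0 = some '-') := fun hx => hdash ((pv_dash_iff tok).mp hx)
      have hcont := pv_contains_mk g k x hk
      have hB : parseStepB (g, k) tok = (g.modify k [] (fun vs => vs ++ [tok]), k) := by
        unfold parseStepB; rw [if_neg hdash]
      rw [hB]
      rw [hB] at hg' hnd'
      have hmod : g.modify k [] (fun vs => vs ++ [tok]) = g.insert k (g.getD k [] ++ [tok]) := rfl
      by_cases hc : g.contains k = true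
      · -- key present: A appends " " ++ tok to the stored string, B appends tok to the list
        obtain ⟨vs, hvs⟩ : ∃ vs, g.get? k = some vs := by
          rw [PySem.Dict.contains_eq_isSome_get?] at hc
          exact Option.isSome_iff_exists.mp hc
        have hmem : (k, vs) ∈ g.items := PySem.Dict.mem_items_of_get?_eq_some _ hvs
        have hvsne : vs ≠ [] := (hg _ hmem).2
        have hndm : ((g.items.map pvMapF).map Prod.fst).Nodup := by
          simpa [List.map_map, Function.comp_def, pvMapF] using hnd
        have hgetD : (PySem.Dict.mk (("cmd", x) :: g.items.map pvMapF)).getD k ""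
            = PySem.Str.join " " vs := by
          have hsome : (PySem.Dict.mk (("cmd", x) :: g.items.map pvMapF)).get? k
              = some (PySem.Str.join " " vs) := by
            rw [PySem.Dict.get?_mk_cons, pv_ne_cmd k hk]
            exact PySem.Dict.get?_of_mem_items _
              (List.mem_map.mpr ⟨(k, vs), hmem, rfl⟩) hndm
          simp [PySem.Dict.getD_eq_get?_getD, hsome]
        have hcd : (PySem.Dict.mk (("cmd", x) :: g.items.map pvMapF)).contains k = true := by
          rw [hcont]; exact hc
        rw [show parseStepA (PySem.Dict.mk (("cmd", x) :: g.items.map pvMapF), k) tok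
              = ((PySem.Dict.mk (("cmd", x) :: g.items.map pvMapF)).insert k
                  (PySem.Str.join " " vs ++ " " ++ tok), k) from by
            unfold parseStepA
            rw [if_neg hdashA, if_neg (by simp [hcd]), hgetD]]
        have hstep : (PySem.Dict.mk (("cmd", x) :: g.items.map pvMapF)).insert k
              (PySem.Str.join " " vs ++ " " ++ tok)
            = PySem.Dict.mk (("cmd", x) ::
                (g.modify k [] (fun vs => vs ++ [tok])).items.map pvMapF) := by
          apply PySem.Dict.ext
          rw [PySem.Dict.items_insert_of_contains _ _ hcd]
          show List.map _ (("cmd", x) :: g.items.map pvMapF)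
              = ("cmd", x) :: (g.modify k [] (fun vs => vs ++ [tok])).items.map pvMapF
          rw [List.map_cons]
          congr 1
          · rw [if_neg (by simp [pv_ne_cmd k hk])]
          · rw [hmod, PySem.Dict.getD_of_get?_eq_some _ _ hvs,
              PySem.Dict.items_insert_of_contains _ _ hc, List.map_map, List.map_map]
            apply List.map_congr_left
            intro q hq
            obtain ⟨a, b⟩ := q
            by_cases hqk : (a == k) = true
            · have ha : a = k := eq_of_beq hqk
              subst ha
              have hb : b = vs := by
                have h1 : g.get? a = some b :=
                  (PySem.Dict.get?_eq_some_iff_mem_items _ _ _ hnd).mpr hq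
                rw [hvs] at h1
                exact (Option.some_inj.mp h1).symm
              subst hb
              simp [Function.comp_apply, pvMapF, pv_join_append _ _ hvsne]
            · have hne : a ≠ k := fun e => hqk (by simp [e])
              simp [Function.comp_apply, pvMapF, hne]
        rw [hstep]
        exact ih _ k hg' hnd' hk
      · -- key absent: both sides append a fresh entry at the end
        have hcf : g.contains k = false := by simpa using hc
        have hcd : (PySem.Dict.mk (("cmd", x) :: g.items.map pvMapF)).contains k = false := by
          rw [hcont]; exact hcf
        rw [show parseStepA (PySem.Dict.mk (("cmd", x) :: g.items.map pvMapF), k) tok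
              = ((PySem.Dict.mk (("cmd", x) :: g.items.map pvMapF)).insert k tok, k) from by
            unfold parseStepA
            rw [if_neg hdashA, if_pos (by simp [hcd])]]
        have hstep : (PySem.Dict.mk (("cmd", x) :: g.items.map pvMapF)).insert k tok
            = PySem.Dict.mk (("cmd", x) ::
                (g.modify k [] (fun vs => vs ++ [tok])).items.map pvMapF) := by
          apply PySem.Dict.ext
          rw [PySem.Dict.items_insert_of_not_contains _ _ hcd]
          rw [hmod, PySem.Dict.getD_of_not_contains _ _ hcf,
            PySem.Dict.items_insert_of_not_contains _ _ hcf]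
          show (("cmd", x) :: g.items.map pvMapF) ++ [(k, tok)]
              = ("cmd", x) :: (g.items ++ [(k, [] ++ [tok])]).map pvMapF
          simp [pvMapF, pv_join_singleton]
        rw [hstep]
        exact ih _ k hg' hnd' hk

-- B's grouping loop keeps the invariants of pv_stepB_inv
lemma pv_loopB_inv (toks : List String) (g : PySem.Dict String (List String)) (k : String)
    (hg : ∀ p ∈ g.items, PySem.Str.startswith p.1 "-" = true ∧ p.2 ≠ [])
    (hnd : g.keys.Nodup)
    (hk : PySem.Str.startswith k "-" = true) :
    (∀ p ∈ (toks.foldl parseStepB (g, k)).1.items,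
        PySem.Str.startswith p.1 "-" = true ∧ p.2 ≠ []) ∧
      (toks.foldl parseStepB (g, k)).1.keys.Nodup := by
  induction toks generalizing g k with
  | nil => exact ⟨hg, hnd⟩
  | cons tok rest ih =>
    obtain ⟨hg', hnd', hk'⟩ := pv_stepB_inv g k tok hg hnd hk
    simp only [List.foldl_cons]
    exact ih (parseStepB (g, k) tok).1 (parseStepB (g, k) tok).2 hg' hnd' hk'

lemma pv_empty_inv :
    ∀ p ∈ (PySem.Dict.empty : PySem.Dict String (List String)).items,
      PySem.Str.startswith p.1 "-" = true ∧ p.2 ≠ [] := by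
  intro p hp
  simp [PySem.Dict.empty] at hp

-- ===== VERDICT (by name: the statement is the Claim_ definition above) =====
theorem parse_spec : Claim_equal_parse := by
  intro cmd _
  unfold Spec_parse parse parse_alt
  cases h : PySem.Str.split₀ cmd with
  | nil => rfl
  | cons x rest =>
    simp only
    rw [PySem.List.slice_from_one]
    simp only [List.tail_cons, List.drop_succ_cons, List.drop_zero]
    have hinit : (PySem.Dict.empty.insert "cmd" x : PySem.Dict String String)
        = PySem.Dict.mk (("cmd", x) ::
            (PySem.Dict.empty : PySem.Dict String (List String)).items.map pvMapF) := rfl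
    rw [hinit, pv_loop_eq rest PySem.Dict.empty "-param" x pv_empty_inv
      PySem.Dict.nodup_keys_empty (by decide)]
    obtain ⟨hgf, hndf⟩ := pv_loopB_inv rest PySem.Dict.empty "-param" pv_empty_inv
      PySem.Dict.nodup_keys_empty (by decide)
    have hfresh : ∀ a ∈ (rest.foldl parseStepB (PySem.Dict.empty, "-param")).1.items,
        (PySem.Dict.mk (("cmd", x) ::
            (PySem.Dict.empty : PySem.Dict String (List String)).items.map pvMapF)
          : PySem.Dict String String).contains a.1 = false := by
      intro a ha
      have hd := (hgf a ha).1
      simp [PySem.Dict.contains, PySem.Dict.empty, pv_ne_cmd a.1 hd]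
    rw [PySem.Dict.items_foldl_insert_fresh
      (rest.foldl parseStepB (PySem.Dict.empty, "-param")).1.items
      (fun kv : String × List String => kv.1)
      (fun kv : String × List String => PySem.Str.join " " kv.2) _ hfresh hndf]
    rfl
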